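-- pv_equiv track=rewrite | github.com/CodeNinja321/sudokuSolver | sudoku.py | findMySquare
-- ===== SOURCE A (Python) =====
-- puzzle = [
--         [0,0,0,0,3,0,0,6,0],
--         [0,0,3,0,0,0,0,9,0],
--         [0,9,0,5,0,0,0,1,4],
--         [0,0,8,0,7,2,0,0,0],
--         [1,0,0,4,0,3,2,0,0],
--         [0,0,0,6,8,0,0,0,1],
--         [0,0,0,0,1,0,0,0,0],
--         [6,3,4,0,0,0,0,0,7],
--         [0,0,1,0,0,6,0,4,5]
--         ]
--
-- def findMySquare(a, b):
--     if a >= 0 and a <= 2: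
--         if b >=0 and b <= 2:
--             return [x[:3] for x in puzzle[:3]]
--         elif b >= 3 and b <= 5:
--             return [x[3:6] for x in puzzle[:3]]
--         else:
--             return [x[6:] for x in puzzle[:3]]
--     elif a >=3 and a <=5:
--         if b >=0 and b <= 2:
--             return [x[:3] for x in puzzle[3:6]]
--         elif b >= 3 and b <= 5:
--             return [x[3:6] for x in puzzle[3:6]]
--         else:
--             return [x[6:] for x in puzzle[3:6]]
--     else:
--         if b >=0 and b <= 2:
--             return [x[:3] for x in puzzle[6:]]
--         elif b >= 3 and b <= 5:
--             return [x[3:6] for x in puzzle[6:]]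
--         else:
--             return [x[6:] for x in puzzle[6:]]
-- ===== SOURCE B (Python) =====
-- puzzle = [
--         [0,0,0,0,3,0,0,6,0],
--         [0,0,3,0,0,0,0,9,0],
--         [0,9,0,5,0,0,0,1,4],
--         [0,0,8,0,7,2,0,0,0],
--         [1,0,0,4,0,3,2,0,0],
--         [0,0,0,6,8,0,0,0,1],
--         [0,0,0,0,1,0,0,0,0],
--         [6,3,4,0,0,0,0,0,7],
--         [0,0,1,0,0,6,0,4,5]
--         ]
--
-- def _band(x):
--     # band index of a coordinate; A's catch-all else sends anything outside 0..5 to the last band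
--     return x // 3 if 0 <= x <= 5 else 2
--
-- def findMySquare(a, b):
--     ra = _band(a)
--     cb = _band(b)
--     out = []
--     for i, row in enumerate(puzzle):
--         if i // 3 == ra:
--             out.append([v for j, v in enumerate(row) if j // 3 == cb])
--     return out
-- ===== Notes on version B (the rewrite author's own statement) =====
-- stated objective: alternative
-- what changed: Instead of A's 9-way nested conditional returning hand-written slices, B scans the whole enumerated grid once and filters rows and cells by a same-band predicate on their indices (band(coord) with A's catch-all mapped to band 2).
import Mathlib
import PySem

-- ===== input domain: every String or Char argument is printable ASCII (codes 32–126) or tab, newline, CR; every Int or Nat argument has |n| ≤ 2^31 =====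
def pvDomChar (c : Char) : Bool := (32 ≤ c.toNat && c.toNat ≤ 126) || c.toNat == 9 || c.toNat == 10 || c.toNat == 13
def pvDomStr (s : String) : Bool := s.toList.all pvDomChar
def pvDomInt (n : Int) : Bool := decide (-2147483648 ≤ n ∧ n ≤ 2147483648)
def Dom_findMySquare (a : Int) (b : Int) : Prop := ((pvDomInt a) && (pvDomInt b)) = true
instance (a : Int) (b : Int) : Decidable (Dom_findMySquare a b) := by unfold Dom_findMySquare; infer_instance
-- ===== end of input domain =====

-- B replaces A's 9-way nested conditional of hand-written slices by one filtering scan of the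
-- enumerated grid with a same-band predicate on indices (objective: alternative, same cost).

def pvPuzzle : List (List Int) := [
        [0,0,0,0,3,0,0,6,0],
        [0,0,3,0,0,0,0,9,0],
        [0,9,0,5,0,0,0,1,4],
        [0,0,8,0,7,2,0,0,0],
        [1,0,0,4,0,3,2,0,0],
        [0,0,0,6,8,0,0,0,1],
        [0,0,0,0,1,0,0,0,0],
        [6,3,4,0,0,0,0,0,7],
        [0,0,1,0,0,6,0,4,5]]

-- ===== PORT A =====
def findMySquare (a : Int) (b : Int) : List (List Int) :=
  if 0 ≤ a ∧ a ≤ 2 then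
    if 0 ≤ b ∧ b ≤ 2 then (PySem.List.slice pvPuzzle none (some 3)).map (fun x => PySem.List.slice x none (some 3))
    else if 3 ≤ b ∧ b ≤ 5 then (PySem.List.slice pvPuzzle none (some 3)).map (fun x => PySem.List.slice x (some 3) (some 6))
    else (PySem.List.slice pvPuzzle none (some 3)).map (fun x => PySem.List.slice x (some 6) none)
  else if 3 ≤ a ∧ a ≤ 5 then
    if 0 ≤ b ∧ b ≤ 2 then (PySem.List.slice pvPuzzle (some 3) (some 6)).map (fun x => PySem.List.slice x none (some 3))
    else if 3 ≤ b ∧ b ≤ 5 then (PySem.List.slice pvPuzzle (some 3) (some 6)).map (fun x => PySem.List.slice x (some 3) (some 6))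
    else (PySem.List.slice pvPuzzle (some 3) (some 6)).map (fun x => PySem.List.slice x (some 6) none)
  else
    if 0 ≤ b ∧ b ≤ 2 then (PySem.List.slice pvPuzzle (some 6) none).map (fun x => PySem.List.slice x none (some 3))
    else if 3 ≤ b ∧ b ≤ 5 then (PySem.List.slice pvPuzzle (some 6) none).map (fun x => PySem.List.slice x (some 3) (some 6))
    else (PySem.List.slice pvPuzzle (some 6) none).map (fun x => PySem.List.slice x (some 6) none)

-- ===== PORT B =====
-- _band in Source B
def pvBand (x : Int) : Int := if 0 ≤ x ∧ x ≤ 5 then PySem.Int.floordiv x 3 else 2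

def findMySquare_alt (a : Int) (b : Int) : List (List Int) :=
  let ra := pvBand a
  let cb := pvBand b
  -- for i, row in enumerate(puzzle): if i//3 == ra: out.append([v for j,v in enumerate(row) if j//3 == cb])
  (PySem.List.enumerate pvPuzzle).foldl (fun out p =>
    if PySem.Int.floordiv p.1 3 = ra then
      out ++ [((PySem.List.enumerate p.2).filter (fun q => PySem.Int.floordiv q.1 3 == cb)).map (·.2)]
    else out) []

-- ===== PRECONDITION & SPEC =====
def Spec_findMySquare (a : Int) (b : Int) (out : List (List Int)) : Prop := out = findMySquare_alt a b
instance (a : Int) (b : Int) (out : List (List Int)) : Decidable (Spec_findMySquare a b out) := by unfold Spec_findMySquare; infer_instance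

-- ===== CLAIM =====
def Claim_equal_findMySquare : Prop := ∀ (a : Int) (b : Int), Dom_findMySquare a b → Spec_findMySquare a b (findMySquare a b)

-- ===== LEMMAS AND PROOFS =====
theorem band_lo (a : Int) (h : ¬(0 ≤ a ∧ a ≤ 5)) : pvBand a = 2 := by
  unfold pvBand; simp [h]

-- ===== VERDICT =====
theorem findMySquare_spec : Claim_equal_findMySquare := by
  intro a b _
  unfold Spec_findMySquare
  by_cases ha : 0 ≤ a ∧ a ≤ 5
  · by_cases hb : 0 ≤ b ∧ b ≤ 5
    · obtain ⟨ha1, ha2⟩ := ha; obtain ⟨hb1, hb2⟩ := hb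
      interval_cases a <;> interval_cases b <;> decide
    · obtain ⟨ha1, ha2⟩ := ha
      have hb1 : ¬(0 ≤ b ∧ b ≤ 2) := fun h => hb ⟨h.1, by omega⟩
      have hb2 : ¬(3 ≤ b ∧ b ≤ 5) := fun h => hb ⟨by omega, h.2⟩
      unfold findMySquare findMySquare_alt
      rw [band_lo b hb]
      simp only [if_neg hb1, if_neg hb2]
      interval_cases a <;> decide
  · have ha1 : ¬(0 ≤ a ∧ a ≤ 2) := fun h => ha ⟨h.1, by omega⟩
    have ha2 : ¬(3 ≤ a ∧ a ≤ 5) := fun h => ha ⟨by omega, h.2⟩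
    unfold findMySquare findMySquare_alt
    rw [band_lo a ha]
    simp only [if_neg ha1, if_neg ha2]
    by_cases hb : 0 ≤ b ∧ b ≤ 5
    · obtain ⟨hb1, hb2⟩ := hb
      interval_cases b <;> decide
    · have hb1 : ¬(0 ≤ b ∧ b ≤ 2) := fun h => hb ⟨h.1, by omega⟩
      have hb2 : ¬(3 ≤ b ∧ b ≤ 5) := fun h => hb ⟨by omega, h.2⟩
      rw [band_lo b hb]
      simp only [if_neg hb1, if_neg hb2]
      decide
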